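-- pv_equiv track=rewrite | github.com/maaninentupee/theia-app | wp-theme/CascadeProjects/personal-website/api_config.py | get_model_for_task
-- ===== SOURCE A (Python) =====
-- from typing import Dict, Optional
--
-- MODEL_CONFIG = {
--     # GPT-4: Monimutkaiset analyysit ja tekstintuotto
--     "gpt4": {
--         "model_id": "gpt-4",
--         "tasks": [
--             "complex_analysis",
--             "detailed_text_generation",
--             "deep_analysis",
--             "advanced_reasoning",
--             "creative_writing"
--         ]
--     },
--
--     # GPT-3.5: Nopeat ja yksinkertaiset tehtävät
--     "gpt35": {
--         "model_id": "gpt-3.5-turbo",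
--         "tasks": [
--             "quick_responses",
--             "simple_tasks",
--             "basic_analysis",
--             "chat_completion",
--             "text_correction"
--         ]
--     },
--
--     # Starcoder: Koodin generointi ja optimointi
--     "starcoder": {
--         "model_id": "bigcode/starcoder",
--         "tasks": [
--             "code_generation",
--             "code_optimization",
--             "code_review",
--             "bug_fixing",
--             "code_completion"
--         ]
--     },
--
--     # Claude: Pitkät keskustelut ja kontekstuaalinen analyysi
--     "claude": {
--         "model_id": "claude-2.1",
--         "tasks": [
--             "contextual_analysis",
--             "long_conversation",
--             "document_analysis",
--             "research_synthesis"
--         ]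
--     }
-- }
--
-- def get_model_for_task(task_type: str) -> Optional[Dict[str, str]]:
--     """Hakee sopivan mallin tehtävätyypille"""
--     for model_name, config in MODEL_CONFIG.items():
--         if task_type in config["tasks"]:
--             return {
--                 "model": model_name,
--                 "model_id": config["model_id"]
--             }
--     return None
-- ===== SOURCE B (Python) =====
-- from typing import Dict, Optional
--
-- MODEL_CONFIG = {
--     "gpt4": {
--         "model_id": "gpt-4",
--         "tasks": [
--             "complex_analysis",
--             "detailed_text_generation",
--             "deep_analysis",
--             "advanced_reasoning",
--             "creative_writing"
--         ]
--     },
--     "gpt35": {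
--         "model_id": "gpt-3.5-turbo",
--         "tasks": [
--             "quick_responses",
--             "simple_tasks",
--             "basic_analysis",
--             "chat_completion",
--             "text_correction"
--         ]
--     },
--     "starcoder": {
--         "model_id": "bigcode/starcoder",
--         "tasks": [
--             "code_generation",
--             "code_optimization",
--             "code_review",
--             "bug_fixing",
--             "code_completion"
--         ]
--     },
--     "claude": {
--         "model_id": "claude-2.1",
--         "tasks": [
--             "contextual_analysis",
--             "long_conversation",
--             "document_analysis",
--             "research_synthesis"
--         ]
--     }
-- }
--
-- # Reverse index built once: task -> {"model": ..., "model_id": ...}; setdefault keeps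
-- # the first model that lists a task, matching the original scan's first-match rule.
-- TASK_TO_MODEL: Dict[str, Dict[str, str]] = {}
-- for _model_name, _config in MODEL_CONFIG.items():
--     for _task in _config["tasks"]:
--         TASK_TO_MODEL.setdefault(_task, {"model": _model_name, "model_id": _config["model_id"]})
--
-- def get_model_for_task(task_type: str) -> Optional[Dict[str, str]]:
--     """Hakee sopivan mallin tehtävätyypille"""
--     return TASK_TO_MODEL.get(task_type)
-- ===== Notes on version B (the rewrite author's own statement) =====
-- stated objective: idiomatic
-- what changed: Replaces the per-call scan over MODEL_CONFIG with per-model membership tests by a module-level reverse index TASK_TO_MODEL built once with setdefault (first model wins), so the function body is a single dict .get with no loop.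
import Mathlib
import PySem

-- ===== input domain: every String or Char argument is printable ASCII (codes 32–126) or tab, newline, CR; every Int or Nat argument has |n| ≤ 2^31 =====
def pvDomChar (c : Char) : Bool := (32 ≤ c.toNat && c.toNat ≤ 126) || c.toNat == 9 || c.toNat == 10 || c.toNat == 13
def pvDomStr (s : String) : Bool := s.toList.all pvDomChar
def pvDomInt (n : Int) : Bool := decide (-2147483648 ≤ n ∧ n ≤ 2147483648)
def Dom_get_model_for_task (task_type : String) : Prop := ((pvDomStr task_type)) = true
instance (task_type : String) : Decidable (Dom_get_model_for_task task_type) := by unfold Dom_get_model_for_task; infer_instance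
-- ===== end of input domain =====

-- B replaces A's per-call scan with a reverse index (task -> record) built once; idiomatic keyed lookup.

-- ===== PORT A =====
-- MODEL_CONFIG as an assoc list: (model_name, (model_id, tasks))
def pvModelConfig : List (String × String × List String) :=
  [ ("gpt4", "gpt-4",
      ["complex_analysis", "detailed_text_generation", "deep_analysis",
       "advanced_reasoning", "creative_writing"]),
    ("gpt35", "gpt-3.5-turbo",
      ["quick_responses", "simple_tasks", "basic_analysis",
       "chat_completion", "text_correction"]),
    ("starcoder", "bigcode/starcoder",
      ["code_generation", "code_optimization", "code_review",
       "bug_fixing", "code_completion"]),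
    ("claude", "claude-2.1",
      ["contextual_analysis", "long_conversation", "document_analysis",
       "research_synthesis"]) ]

-- the 'for model_name, config in MODEL_CONFIG.items(): if task_type in config["tasks"]: return ...' loop
def pvScan (task_type : String) : List (String × String × List String) → Option (List (String × String))
  | [] => none
  | (model_name, model_id, tasks) :: rest =>
    if tasks.contains task_type then
      some [("model", model_name), ("model_id", model_id)]
    else pvScan task_type rest

def get_model_for_task (task_type : String) : Option (List (String × String)) :=
  pvScan task_type pvModelConfig

-- ===== PORT B =====
-- module-level reverse index: TASK_TO_MODEL built once with setdefault (first model wins)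
def pvTaskToModel : PySem.Dict String (List (String × String)) :=
  pvModelConfig.foldl
    (fun d entry =>
      entry.2.2.foldl
        (fun d task =>
          -- setdefault: insert only if the key is absent
          match PySem.Dict.get? d task with
          | some _ => d
          | none => PySem.Dict.insert d task
              [("model", entry.1), ("model_id", entry.2.1)])
        d)
    PySem.Dict.empty

def get_model_for_task_alt (task_type : String) : Option (List (String × String)) :=
  PySem.Dict.get? pvTaskToModel task_type

-- ===== PRECONDITION & SPEC =====
def Spec_get_model_for_task (task_type : String) (out : Option (List (String × String))) : Prop := out = get_model_for_task_alt task_type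
instance (task_type : String) (out : Option (List (String × String))) : Decidable (Spec_get_model_for_task task_type out) := by unfold Spec_get_model_for_task; infer_instance

-- ===== CLAIM (what is proved, stated in full; the proofs are below) =====
def Claim_equal_get_model_for_task : Prop := ∀ (task_type : String), Dom_get_model_for_task task_type → Spec_get_model_for_task task_type (get_model_for_task task_type)

-- ===== LEMMAS AND PROOFS =====

-- pvTaskToModel evaluated once (the one-time index build), used by the proof below
theorem pvTaskToModel_eval : pvTaskToModel = PySem.Dict.mk
  [ ("complex_analysis", [("model", "gpt4"), ("model_id", "gpt-4")]),
    ("detailed_text_generation", [("model", "gpt4"), ("model_id", "gpt-4")]),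
    ("deep_analysis", [("model", "gpt4"), ("model_id", "gpt-4")]),
    ("advanced_reasoning", [("model", "gpt4"), ("model_id", "gpt-4")]),
    ("creative_writing", [("model", "gpt4"), ("model_id", "gpt-4")]),
    ("quick_responses", [("model", "gpt35"), ("model_id", "gpt-3.5-turbo")]),
    ("simple_tasks", [("model", "gpt35"), ("model_id", "gpt-3.5-turbo")]),
    ("basic_analysis", [("model", "gpt35"), ("model_id", "gpt-3.5-turbo")]),
    ("chat_completion", [("model", "gpt35"), ("model_id", "gpt-3.5-turbo")]),
    ("text_correction", [("model", "gpt35"), ("model_id", "gpt-3.5-turbo")]),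
    ("code_generation", [("model", "starcoder"), ("model_id", "bigcode/starcoder")]),
    ("code_optimization", [("model", "starcoder"), ("model_id", "bigcode/starcoder")]),
    ("code_review", [("model", "starcoder"), ("model_id", "bigcode/starcoder")]),
    ("bug_fixing", [("model", "starcoder"), ("model_id", "bigcode/starcoder")]),
    ("code_completion", [("model", "starcoder"), ("model_id", "bigcode/starcoder")]),
    ("contextual_analysis", [("model", "claude"), ("model_id", "claude-2.1")]),
    ("long_conversation", [("model", "claude"), ("model_id", "claude-2.1")]),
    ("document_analysis", [("model", "claude"), ("model_id", "claude-2.1")]),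
    ("research_synthesis", [("model", "claude"), ("model_id", "claude-2.1")]) ] := by
  rfl

-- ===== VERDICT (by name: the statement is the Claim_ definition above) =====
theorem get_model_for_task_spec : Claim_equal_get_model_for_task := by
  intro t _
  unfold Spec_get_model_for_task
  by_cases h1 : t = "complex_analysis"; · subst h1; rfl
  by_cases h2 : t = "detailed_text_generation"; · subst h2; rfl
  by_cases h3 : t = "deep_analysis"; · subst h3; rfl
  by_cases h4 : t = "advanced_reasoning"; · subst h4; rfl
  by_cases h5 : t = "creative_writing"; · subst h5; rfl
  by_cases h6 : t = "quick_responses"; · subst h6; rfl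
  by_cases h7 : t = "simple_tasks"; · subst h7; rfl
  by_cases h8 : t = "basic_analysis"; · subst h8; rfl
  by_cases h9 : t = "chat_completion"; · subst h9; rfl
  by_cases h10 : t = "text_correction"; · subst h10; rfl
  by_cases h11 : t = "code_generation"; · subst h11; rfl
  by_cases h12 : t = "code_optimization"; · subst h12; rfl
  by_cases h13 : t = "code_review"; · subst h13; rfl
  by_cases h14 : t = "bug_fixing"; · subst h14; rfl
  by_cases h15 : t = "code_completion"; · subst h15; rfl
  by_cases h16 : t = "contextual_analysis"; · subst h16; rfl
  by_cases h17 : t = "long_conversation"; · subst h17; rfl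
  by_cases h18 : t = "document_analysis"; · subst h18; rfl
  by_cases h19 : t = "research_synthesis"; · subst h19; rfl
  simp [get_model_for_task, get_model_for_task_alt, pvScan, pvModelConfig,
        pvTaskToModel_eval, PySem.Dict.get?_mk_cons, PySem.Dict.get?,
        h1, Ne.symm h1, h2, Ne.symm h2, h3, Ne.symm h3, h4, Ne.symm h4, h5, Ne.symm h5, h6, Ne.symm h6, h7, Ne.symm h7, h8, Ne.symm h8, h9, Ne.symm h9, h10, Ne.symm h10, h11, Ne.symm h11, h12, Ne.symm h12, h13, Ne.symm h13, h14, Ne.symm h14, h15, Ne.symm h15, h16, Ne.symm h16, h17, Ne.symm h17, h18, Ne.symm h18, h19, Ne.symm h19]
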